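-- pv_equiv track=rewrite | github.com/welli7ngton/Python | Funções/Recursividade/exercicio7.py | contem_par
-- ===== SOURCE A (Python) =====
-- def contem_par(lista, pos=0):
--
--     if pos >= len(lista):
--         return False
--     num = lista[pos]
--     if num %2 == 0:
--         return True
--     else:
--         pos += 1
--         return contem_par(lista, pos)
-- ===== SOURCE B (Python) =====
-- def contem_par(lista, pos=0):
--     for i in range(pos, len(lista)):
--         if lista[i] % 2 == 0:
--             return True
--     return False
-- ===== Notes on version B (the rewrite author's own statement) =====
-- stated objective: idiomatic
-- what changed: Replaced the tail-recursive call with an explicit iterative for-loop over range(pos, len(lista)), which preserves the negative-pos index order exactly.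
import Mathlib
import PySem

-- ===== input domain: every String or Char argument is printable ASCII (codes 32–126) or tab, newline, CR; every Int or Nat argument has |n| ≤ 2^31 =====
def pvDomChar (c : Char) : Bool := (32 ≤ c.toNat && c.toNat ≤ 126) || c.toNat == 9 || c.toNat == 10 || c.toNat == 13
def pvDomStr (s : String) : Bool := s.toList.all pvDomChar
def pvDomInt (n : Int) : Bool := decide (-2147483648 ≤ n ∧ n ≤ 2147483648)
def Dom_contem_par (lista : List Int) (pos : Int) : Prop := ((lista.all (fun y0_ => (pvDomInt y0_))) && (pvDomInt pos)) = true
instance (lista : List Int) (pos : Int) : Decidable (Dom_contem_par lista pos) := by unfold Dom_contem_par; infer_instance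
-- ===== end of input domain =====

-- B replaces A's tail recursion with an iterative loop over range(pos, len(lista)); same values, same index order.

-- ===== PORT A =====
def contem_par (lista : List Int) (pos : Int) : Bool :=
  if _h : (lista.length : Int) ≤ pos then false
  else
    match PySem.List.pyGet? lista pos with
    | none => false          -- IndexError in Python; excluded by Pre_
    | some num =>
      if PySem.Int.mod num 2 == 0 then true
      else contem_par lista (pos + 1)
termination_by ((lista.length : Int) - pos).toNat
decreasing_by omega

-- ===== PORT B =====
-- the for-loop body of Source B, with early return, over the index list range(pos, len(lista))
def pvAltLoop (lista : List Int) : List Int → Bool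
  | [] => false
  | i :: rest =>
    match PySem.List.pyGet? lista i with
    | none => false          -- IndexError in Python; excluded by Pre_
    | some x => if PySem.Int.mod x 2 == 0 then true else pvAltLoop lista rest

def contem_par_alt (lista : List Int) (pos : Int) : Bool :=
  pvAltLoop lista (PySem.List.pyRange pos (lista.length : Int) 1)

-- ===== PRECONDITION & SPEC =====
-- Pre_ excludes exactly the inputs where Python A raises IndexError (pos below -len(lista)); B raises there too.
def Pre_contem_par (lista : List Int) (pos : Int) : Prop := -(lista.length : Int) ≤ pos
instance (lista : List Int) (pos : Int) : Decidable (Pre_contem_par lista pos) := by unfold Pre_contem_par; infer_instance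
def pvWitness_contem_par : List Int × Int := ([1, 3, 4], -2)

def Spec_contem_par (lista : List Int) (pos : Int) (out : Bool) : Prop := out = contem_par_alt lista pos
instance (lista : List Int) (pos : Int) (out : Bool) : Decidable (Spec_contem_par lista pos out) := by unfold Spec_contem_par; infer_instance

-- ===== CLAIM (what is proved, stated in full; the proofs are below) =====
def Claim_equal_contem_par : Prop := ∀ (lista : List Int) (pos : Int), Dom_contem_par lista pos → Pre_contem_par lista pos → Spec_contem_par lista pos (contem_par lista pos)

-- ===== LEMMAS AND PROOFS =====
theorem contem_par_eq_alt (lista : List Int) :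
    ∀ (n : Nat) (pos : Int), ((lista.length : Int) - pos).toNat = n →
      contem_par lista pos = pvAltLoop lista (PySem.List.pyRange pos (lista.length : Int) 1) := by
  intro n
  induction n with
  | zero =>
    intro pos h
    have hle : (lista.length : Int) ≤ pos := by omega
    rw [contem_par, PySem.List.pyRange_one_eq_nil hle]
    simp [hle, pvAltLoop]
  | succ k ih =>
    intro pos h
    have hlt : pos < (lista.length : Int) := by omega
    rw [contem_par, PySem.List.pyRange_one_cons hlt]
    simp only [not_le.mpr hlt, dite_false, pvAltLoop]
    cases PySem.List.pyGet? lista pos with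
    | none => rfl
    | some x => exact if_congr Iff.rfl rfl (ih (pos + 1) (by omega))

-- ===== VERDICT (by name: the statement is the Claim_ definition above) =====
theorem contem_par_spec : Claim_equal_contem_par := by
  intro lista pos _ _
  unfold Spec_contem_par contem_par_alt
  exact contem_par_eq_alt lista _ pos rfl
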